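-- pv_equiv track=rewrite | github.com/grace890306/0---1-python-practice | 3-1 self-dividing number.py | max_self_dividing_difference
-- ===== SOURCE A (Python) =====
-- def max_self_dividing_difference(left, right):
--     """找出在左右邊界之間的 Self-Dividing Number 的最大差距"""
--     dividings = []
--     for i in range(left, right+1):
--       if is_self_dividing(i):
--         dividings.append(i)
--
--     max_diff = 0
--     max_diff_pair = None
--     for i in range(len(dividings)-1):
--       if dividings[i+1] - dividings[i] > max_diff:
--         max_diff_pair = (dividings[i], dividings[i+1])
--         max_diff = dividings[i+1] - dividings[i]
--     return max_diff_pair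
--
-- def is_self_dividing(n):
--     """檢查一個數字是否是自除數"""
--     digits = [int(d) for d in str(n)]
--     for d in digits:
--         if d == 0 or n % d != 0:
--             return False
--     return True
-- ===== SOURCE B (Python) =====
-- def is_self_dividing(n):
--     """檢查一個數字是否是自除數"""
--     return all(d != 0 and n % d == 0 for d in map(int, str(n)))
--
-- def max_self_dividing_difference(left, right):
--     """找出在左右邊界之間的 Self-Dividing Number 的最大差距"""
--     prev = None
--     max_diff = 0
--     max_diff_pair = None
--     for i in range(left, right + 1):
--         if is_self_dividing(i):
--             if prev is not None and i - prev > max_diff: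
--                 max_diff = i - prev
--                 max_diff_pair = (prev, i)
--             prev = i
--     return max_diff_pair
-- ===== Notes on version B (the rewrite author's own statement) =====
-- stated objective: simpler
-- what changed: B replaces A's two-phase algorithm (materialize the list of self-dividing numbers, then index-scan adjacent pairs) with a single running-state pass keeping only the previous self-dividing number, and replaces the digit loop in is_self_dividing with an all() over the digits; Pre_ excludes inputs where A raises ValueError (a nonempty range starting below 0, where int('-') fails).
import Mathlib
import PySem

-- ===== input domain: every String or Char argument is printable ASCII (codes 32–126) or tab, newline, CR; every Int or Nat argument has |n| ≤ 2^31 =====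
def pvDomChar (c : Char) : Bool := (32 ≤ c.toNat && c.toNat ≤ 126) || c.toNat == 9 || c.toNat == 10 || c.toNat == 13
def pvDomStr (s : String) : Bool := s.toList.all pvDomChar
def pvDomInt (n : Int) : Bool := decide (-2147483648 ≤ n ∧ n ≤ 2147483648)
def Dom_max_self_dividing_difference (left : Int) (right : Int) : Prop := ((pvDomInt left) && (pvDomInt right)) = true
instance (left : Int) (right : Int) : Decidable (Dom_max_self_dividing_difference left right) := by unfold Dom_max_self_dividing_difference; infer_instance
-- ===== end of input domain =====

-- ===== PORT A =====
-- B replaces A's two-phase scan (build the list of self-dividing numbers, then index-scan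
-- adjacent pairs) with a single running-state pass; return values proved equal on Pre_.
-- helper for A: is_self_dividing's digit loop with early return False
def pvSdGoA (n : Int) : List Int → Bool
  | [] => true
  | d :: ds => if d == 0 || PySem.Int.mod n d != 0 then false else pvSdGoA n ds

-- int(d) for a single char d is ported via PySem.Int.ofChars?; the .getD 0 default is never
-- reached inside Pre_ (every char of str(n) for n ≥ 0 is a digit)
def is_self_dividing_A (n : Int) : Bool :=
  pvSdGoA n ((PySem.Int.toChars n).map (fun c => (PySem.Int.ofChars? [c]).getD 0))

-- the body of A's second loop (dividings[i] is always in range, so pyGetD's default 0 is unreached)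
def pvAStep (L : List Int) (s : Int × Option (Int × Int)) (i : Int) : Int × Option (Int × Int) :=
  if PySem.List.pyGetD L (i + 1) 0 - PySem.List.pyGetD L i 0 > s.1 then
    (PySem.List.pyGetD L (i + 1) 0 - PySem.List.pyGetD L i 0,
     some (PySem.List.pyGetD L i 0, PySem.List.pyGetD L (i + 1) 0))
  else s

def max_self_dividing_difference (left : Int) (right : Int) : Option (Int × Int) :=
  let dividings :=
    (PySem.List.pyRange left (right + 1) 1).foldl
      (fun acc i => if is_self_dividing_A i then acc ++ [i] else acc) []
  ((PySem.List.pyRange 0 (PySem.List.len dividings - 1) 1).foldl (pvAStep dividings)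
      ((0 : Int), (none : Option (Int × Int)))).2

-- ===== PORT B =====
def is_self_dividing_B (n : Int) : Bool :=
  ((PySem.Int.toChars n).map (fun c => (PySem.Int.ofChars? [c]).getD 0)).all
    (fun d => d != 0 && PySem.Int.mod n d == 0)

-- the body of B's single loop: state (prev, max_diff, max_diff_pair)
def pvBStep (st : Option Int × Int × Option (Int × Int)) (i : Int) :
    Option Int × Int × Option (Int × Int) :=
  if is_self_dividing_B i then
    match st.1 with
    | some p =>
      if i - p > st.2.1 then (some i, i - p, some (p, i)) else (some i, st.2.1, st.2.2)
    | none => (some i, st.2.1, st.2.2)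
  else st

def max_self_dividing_difference_alt (left : Int) (right : Int) : Option (Int × Int) :=
  ((PySem.List.pyRange left (right + 1) 1).foldl pvBStep
      ((none : Option Int), (0 : Int), (none : Option (Int × Int)))).2.2

-- ===== PRECONDITION & SPEC =====
-- Pre_ excludes exactly the inputs where the Python A raises ValueError: a nonempty
-- range containing a negative number (int('-') fails on the minus sign of str(i)).
def Pre_max_self_dividing_difference (left : Int) (right : Int) : Prop :=
  0 ≤ left ∨ right < left
instance (left : Int) (right : Int) : Decidable (Pre_max_self_dividing_difference left right) := by
  unfold Pre_max_self_dividing_difference; infer_instance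

def pvWitness_max_self_dividing_difference : Int × Int := (1, 22)

def Spec_max_self_dividing_difference (left : Int) (right : Int) (out : Option (Int × Int)) : Prop := out = max_self_dividing_difference_alt left right
instance (left : Int) (right : Int) (out : Option (Int × Int)) : Decidable (Spec_max_self_dividing_difference left right out) := by unfold Spec_max_self_dividing_difference; infer_instance

-- ===== CLAIM (what is proved, stated in full; the proofs are below) =====
def Claim_equal_max_self_dividing_difference : Prop := ∀ (left : Int) (right : Int), Dom_max_self_dividing_difference left right → Pre_max_self_dividing_difference left right → Spec_max_self_dividing_difference left right (max_self_dividing_difference left right)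

-- ===== LEMMAS AND PROOFS =====

-- the two digit tests agree (on every Int: same digit list, De Morgan on the loop test)
theorem pvSdGoA_eq_all (n : Int) (ds : List Int) :
    pvSdGoA n ds = ds.all (fun d => d != 0 && PySem.Int.mod n d == 0) := by
  induction ds with
  | nil => rfl
  | cons d ds ih =>
      simp only [pvSdGoA, List.all_cons, ih]
      by_cases hd : d = 0 <;> by_cases hm : PySem.Int.mod n d = 0 <;> simp [hd, hm]

theorem sd_eq (n : Int) : is_self_dividing_A n = is_self_dividing_B n := by
  simp only [is_self_dividing_A, is_self_dividing_B, pvSdGoA_eq_all]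

-- pair-gap scan as structural recursion on the list of self-dividing numbers
def pvG : Int → Int → Option (Int × Int) → List Int → Int × Option (Int × Int)
  | _, md, mp, [] => (md, mp)
  | p, md, mp, x :: xs =>
    if x - p > md then pvG x (x - p) (some (p, x)) xs else pvG x md mp xs

-- A's index loop over a nonempty list is the pair-gap scan
theorem pvAStep_shift (y : Int) (L : List Int) (s : Int × Option (Int × Int)) (k : Nat) :
    pvAStep (y :: L) s ((k : Int) + 1) = pvAStep L s (k : Int) := by
  simp only [pvAStep]
  rw [show (k : Int) + 1 + 1 = ((k + 2 : Nat) : Int) by push_cast; ring]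
  rw [show (k : Int) + 1 = ((k + 1 : Nat) : Int) by push_cast; ring]
  simp only [PySem.List.pyGetD_natCast]
  rfl

theorem idx_eq (t : List Int) : ∀ (h0 md : Int) (mp : Option (Int × Int)),
    ((PySem.List.pyRange 0 (t.length : Int) 1).foldl (pvAStep (h0 :: t)) (md, mp)) =
      pvG h0 md mp t := by
  induction t with
  | nil =>
      intro h0 md mp
      simp only [List.length_nil, Nat.cast_zero]
      rw [PySem.List.pyRange_one_eq_nil (by omega)]
      rfl
  | cons x xs ih =>
      intro h0 md mp
      have hb : ((x :: xs).length : Int) = (xs.length : Int) + 1 := by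
        push_cast [List.length_cons]; ring
      rw [hb, PySem.List.pyRange_one_cons (by positivity), List.foldl_cons,
        PySem.List.pyRange_one]
      rw [show (((xs.length : Int) + 1) - (0 + 1)).toNat = xs.length by omega,
        List.foldl_map]
      rw [List.foldl_ext (fun s (k : Nat) => pvAStep (h0 :: x :: xs) s (0 + 1 + (k : Int)))
        (fun s (k : Nat) => pvAStep (x :: xs) s (k : Int)) _
        (fun a k _ => by
          show pvAStep (h0 :: x :: xs) a (0 + 1 + (k : Int)) = pvAStep (x :: xs) a (k : Int)
          rw [show (0 : Int) + 1 + (k : Int) = (k : Int) + 1 by ring]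
          exact pvAStep_shift h0 (x :: xs) a k)]
      rw [show (List.foldl (fun s (k : Nat) => pvAStep (x :: xs) s (k : Int))
            (pvAStep (h0 :: x :: xs) (md, mp) 0) (List.range xs.length)) =
          List.foldl (pvAStep (x :: xs)) (pvAStep (h0 :: x :: xs) (md, mp) 0)
            ((List.range xs.length).map (fun k : Nat => (k : Int))) from List.foldl_map.symm]
      rw [← PySem.List.pyRange_zero_nat, ih]
      have hstep : pvAStep (h0 :: x :: xs) (md, mp) 0 =
          if x - h0 > md then (x - h0, some (h0, x)) else (md, mp) := by
        simp only [pvAStep]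
        rw [show (0 : Int) + 1 = ((1 : Nat) : Int) by norm_num,
          show (0 : Int) = ((0 : Nat) : Int) by norm_num]
        simp only [PySem.List.pyGetD_natCast]
        rfl
      rw [hstep]
      by_cases hc : x - h0 > md <;> simp [pvG, hc]

-- B's fold with prev = some p is the pair-gap scan of the filtered tail
theorem b_some (xs : List Int) : ∀ (p md : Int) (mp : Option (Int × Int)),
    (xs.foldl pvBStep (some p, md, mp)).2 = pvG p md mp (xs.filter is_self_dividing_B) := by
  induction xs with
  | nil => intro p md mp; rfl
  | cons x xs ih =>
      intro p md mp
      rw [List.foldl_cons, List.filter_cons]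
      by_cases hs : is_self_dividing_B x = true
      · simp only [hs, if_pos]
        have : pvBStep (some p, md, mp) x =
            if x - p > md then (some x, x - p, some (p, x)) else (some x, md, mp) := by
          simp [pvBStep, hs]
        rw [this]
        by_cases hc : x - p > md <;> simp [pvG, hc, ih]
      · simp only [Bool.not_eq_true] at hs
        simp [pvBStep, hs, ih]

theorem b_none (xs : List Int) :
    (xs.foldl pvBStep ((none : Option Int), (0 : Int), (none : Option (Int × Int)))).2 =
      (match xs.filter is_self_dividing_B with
       | [] => ((0 : Int), (none : Option (Int × Int)))
       | h :: t => pvG h 0 none t) := by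
  induction xs with
  | nil => rfl
  | cons x xs ih =>
      rw [List.foldl_cons, List.filter_cons]
      by_cases hs : is_self_dividing_B x = true
      · have : pvBStep (none, 0, none) x = (some x, 0, none) := by simp [pvBStep, hs]
        simp only [hs, if_pos, this, b_some]
      · simp only [Bool.not_eq_true] at hs
        simp [pvBStep, hs, ih]

-- ===== VERDICT (by name: the statement is the Claim_ definition above) =====
theorem max_self_dividing_difference_spec : Claim_equal_max_self_dividing_difference := by
  intro left right _ _
  unfold Spec_max_self_dividing_difference
  have hfe : (PySem.List.pyRange left (right + 1) 1).filter is_self_dividing_A =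
      (PySem.List.pyRange left (right + 1) 1).filter is_self_dividing_B :=
    List.filter_congr (fun x _ => by rw [sd_eq])
  simp only [max_self_dividing_difference, max_self_dividing_difference_alt,
    PySem.List.foldl_append_if_eq_filter, List.nil_append, hfe, b_none, PySem.List.len_eq]
  cases hF : (PySem.List.pyRange left (right + 1) 1).filter is_self_dividing_B with
  | nil =>
      rw [show ((List.length ([] : List Int) : Int) - 1) = -1 by simp]
      rw [PySem.List.pyRange_one_eq_nil (by omega)]
      rfl
  | cons h t =>
      have hlen : ((h :: t).length : Int) - 1 = (t.length : Int) := by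
        push_cast [List.length_cons]; ring
      rw [hlen, idx_eq]
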